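-- pv_equiv track=rewrite | github.com/981377660LMT/algorithm-study | 11_动态规划/经典题/dfs+cache/字典序路径后序dfs/656. 金币路径.-字典序最小最短路.py | cheapestJump2
-- ===== SOURCE A (Python) =====
-- from functools import lru_cache
-- from typing import List, Tuple
--
-- INF = int(1e18)
--
-- def cheapestJump2(coins: List[int], maxJump: int) -> List[int]:
--     """正着记忆化搜索"""
--
--     @lru_cache(None)
--     def dfs(index: int) -> Tuple[int, List[int]]:  # 返回值: (cost, path)
--         if index >= n or coins[index] == -1:
--             return INF, []
--         if index == n - 1:
--             return coins[index], [n - 1]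
--
--         curCost, curPath = INF, []
--         for next in range(index + 1, min(index + maxJump + 1, n)):
--             nextCost, nextPath = dfs(next)
--             candCost, candPath = nextCost + coins[index], [index] + nextPath
--             if candCost < curCost:
--                 curCost, curPath = candCost, candPath
--             elif candCost == curCost and candPath < curPath:
--                 curPath = candPath
--
--         return curCost, curPath
--
--     n = len(coins)
--     _, path = dfs(0)
--     dfs.cache_clear()
--     return [num + 1 for num in path]
-- ===== SOURCE B (Python) =====
-- # B: bottom-up DP over (cost, successor) instead of memoized recursion over whole
-- # paths; ties resolve to the smallest successor automatically because the window
-- # is scanned in increasing order with a strict comparison.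
-- INF = int(1e18)
--
--
-- def cheapestJump2(coins, maxJump):
--     n = len(coins)
--     dp = [INF] * n   # dp[i]: cost of the cheapest jump path starting at i
--     nxt = [0] * n    # successor of i on that path
--     if n and coins[n - 1] != -1:
--         dp[n - 1] = coins[n - 1]
--     for i in range(n - 2, -1, -1):
--         if coins[i] == -1:
--             continue
--         for j in range(i + 1, min(i + maxJump + 1, n)):
--             cand = dp[j] + coins[i]
--             if cand < dp[i]:
--                 dp[i] = cand
--                 nxt[i] = j
--     path = []
--     i = 0
--     while i < n and dp[i] < INF:
--         path.append(i + 1)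
--         if i == n - 1:
--             break
--         i = nxt[i]
--     return path
-- ===== Notes on version B (the rewrite author's own statement) =====
-- stated objective: faster
-- what changed: Replaces A's memoized top-down recursion that builds and lexicographically compares whole candidate paths at every index by a bottom-up DP storing only (cost, successor) per index — scanning each window in increasing order with a strict comparison yields the lexicographically smallest path — reconstructed once at the end by following the successor pointers.
import Mathlib
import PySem

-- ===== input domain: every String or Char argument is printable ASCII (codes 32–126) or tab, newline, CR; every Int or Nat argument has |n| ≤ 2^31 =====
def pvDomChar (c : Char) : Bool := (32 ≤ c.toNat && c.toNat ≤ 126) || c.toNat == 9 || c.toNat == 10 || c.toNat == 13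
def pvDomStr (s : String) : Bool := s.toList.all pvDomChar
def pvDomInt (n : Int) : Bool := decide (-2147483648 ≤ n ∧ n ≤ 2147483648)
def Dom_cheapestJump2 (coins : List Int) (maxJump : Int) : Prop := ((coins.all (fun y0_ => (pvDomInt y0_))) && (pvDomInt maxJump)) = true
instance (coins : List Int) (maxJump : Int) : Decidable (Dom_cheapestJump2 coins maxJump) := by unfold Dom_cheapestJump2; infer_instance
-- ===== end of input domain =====

-- B replaces A's memoized recursion over whole paths by a bottom-up DP over
-- (cost, successor) pairs with a single path reconstruction at the end.

def INFA : Int := 1000000000000000000    -- INF = int(1e18)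

-- xs[i] for an index known to be in range 0 ≤ i < len xs (exact there)
def getE (xs : List Int) (i : Int) : Int := (PySem.List.pyGet? xs i).getD 0

-- ===== PORT A =====
-- Python list `<` (lexicographic) on int lists, hand-ported (exact)
def lexLt : List Int → List Int → Bool
  | _, [] => false
  | [], _ :: _ => true
  | a :: x, b :: y => if a < b then true else if b < a then false else lexLt x y

-- the memoized dfs; fuel only makes the recursion structural (n+1 is always
-- enough since `index` strictly increases and dfs stops at index ≥ n)
def dfsA (coins : List Int) (maxJump n : Int) : Nat → Int → Int × List Int
  | 0, _ => (INFA, [])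
  | fuel + 1, index =>
    if n ≤ index ∨ getE coins index = -1 then (INFA, [])
    else if index = n - 1 then (getE coins index, [n - 1])
    else
      (PySem.List.pyRange (index + 1) (min (index + maxJump + 1) n) 1).foldl
        (fun cur next =>
          let nx := dfsA coins maxJump n fuel next
          let candCost := nx.1 + getE coins index
          let candPath := index :: nx.2
          if candCost < cur.1 then (candCost, candPath)
          else if candCost = cur.1 ∧ lexLt candPath cur.2 then (cur.1, candPath)
          else cur)
        (INFA, [])

def cheapestJump2 (coins : List Int) (maxJump : Int) : List Int :=
  ((dfsA coins maxJump coins.length (coins.length + 1) 0).2).map (· + 1)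

-- ===== PORT B =====
-- inner relaxation `for j in range(i+1, min(i+maxJump+1, n)): ...` over (dp, nxt)
def innerB (coins : List Int) (i : Int) (st : List Int × List Int) (j : Int) : List Int × List Int :=
  let cand := getE st.1 j + getE coins i
  if cand < getE st.1 i then (st.1.set i.toNat cand, st.2.set i.toNat j) else st

-- one iteration of the outer backward loop
def stepB (coins : List Int) (maxJump n : Int) (st : List Int × List Int) (i : Int) :
    List Int × List Int :=
  if getE coins i = -1 then st
  else (PySem.List.pyRange (i + 1) (min (i + maxJump + 1) n) 1).foldl (innerB coins i) st

-- the reconstruction while-loop (fuel n+1 is enough: the visited indices strictly increase)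
def walkB (dp nxt : List Int) (n : Int) : Nat → Int → List Int
  | 0, _ => []
  | f + 1, i =>
    if i < n ∧ getE dp i < INFA then
      (i + 1) :: (if i = n - 1 then [] else walkB dp nxt n f (getE nxt i))
    else []

def cheapestJump2_alt (coins : List Int) (maxJump : Int) : List Int :=
  let n : Int := coins.length
  let dp0 : List Int := List.replicate coins.length INFA
  let dp1 : List Int :=
    if coins.length ≠ 0 ∧ getE coins (n - 1) ≠ -1
      then dp0.set (n - 1).toNat (getE coins (n - 1)) else dp0
  let st := (PySem.List.pyRange (n - 2) (-1) (-1)).foldl (stepB coins maxJump n)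
    (dp1, List.replicate coins.length 0)
  walkB st.1 st.2 n (coins.length + 1) 0

-- ===== PRECONDITION & SPEC =====
def Spec_cheapestJump2 (coins : List Int) (maxJump : Int) (out : List Int) : Prop := out = cheapestJump2_alt coins maxJump
instance (coins : List Int) (maxJump : Int) (out : List Int) : Decidable (Spec_cheapestJump2 coins maxJump out) := by unfold Spec_cheapestJump2; infer_instance

-- ===== CLAIM (what is proved, stated in full; the proofs are below) =====
def Claim_equal_cheapestJump2 : Prop := ∀ (coins : List Int) (maxJump : Int), Dom_cheapestJump2 coins maxJump → Spec_cheapestJump2 coins maxJump (cheapestJump2 coins maxJump)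

-- ===== LEMMAS AND PROOFS =====

-- per-index facts once index i has been finalized by B's backward loop
def FinI (coins : List Int) (maxJump n : Int) (dp nxt : List Int) (i : Int) : Prop :=
  getE dp i ≤ INFA ∧
  (getE dp i < INFA → i ≠ n - 1 → i < getE nxt i ∧ getE nxt i < n) ∧
  ∀ f : Nat, (n - i).toNat ≤ f →
    (dfsA coins maxJump n f i).1 = getE dp i ∧
    walkB dp nxt n f i = (dfsA coins maxJump n f i).2.map (· + 1) ∧
    (getE dp i = INFA → (dfsA coins maxJump n f i).2 = []) ∧
    (getE dp i < INFA → (dfsA coins maxJump n f i).2 =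
      if i = n - 1 then [i] else i :: (dfsA coins maxJump n (f - 1) (getE nxt i)).2)

-- invariant of B's backward loop: indices ≥ k finalized, dp entries < k untouched
def InvB (coins : List Int) (maxJump n k : Int) (st : List Int × List Int) : Prop :=
  st.1.length = coins.length ∧ st.2.length = coins.length ∧
  (∀ i : Int, k ≤ i → i < n → FinI coins maxJump n st.1 st.2 i) ∧
  (∀ i : Int, 0 ≤ i → i < k → getE st.1 i = INFA)

-- relation between B's inner relaxation state and A's (cost, path) accumulator
def MidI (coins : List Int) (maxJump n k : Int) (f : Nat) (dp0 nxt0 dp nxt : List Int)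
    (c : Int) (p : List Int) : Prop :=
  dp.length = dp0.length ∧ nxt.length = nxt0.length ∧
  c = getE dp k ∧ c ≤ INFA ∧
  (∀ v : Int, 0 ≤ v → ¬ v = k → getE dp v = getE dp0 v ∧ getE nxt v = getE nxt0 v) ∧
  (c = INFA → p = [] ∧ dp = dp0 ∧ nxt = nxt0) ∧
  (c < INFA → k < getE nxt k ∧ getE nxt k < n ∧
    getE dp k = getE dp0 (getE nxt k) + getE coins k ∧
    p = k :: (dfsA coins maxJump n f (getE nxt k)).2)

theorem lexLt_nil (x : List Int) : lexLt x [] = false := by cases x <;> rfl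

theorem lexLt_cons_self (i : Int) (x y : List Int) :
    lexLt (i :: x) (i :: y) = lexLt x y := by
  simp [lexLt]

theorem lexLt_cons_gt {a b : Int} (h : b < a) (x y : List Int) :
    lexLt (a :: x) (b :: y) = false := by
  simp [lexLt, h, not_lt.mpr (le_of_lt h)]

theorem getE_natCast (xs : List Int) (i : Int) (h0 : 0 ≤ i) :
    getE xs i = xs.getD i.toNat 0 := by
  simp [getE, PySem.List.pyGet?_of_nonneg xs h0, List.getD]

theorem getE_set_self (xs : List Int) (i v : Int) (h0 : 0 ≤ i) (h : i.toNat < xs.length) :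
    getE (xs.set i.toNat v) i = v := by
  simp [getE_natCast _ _ h0, List.getD, List.getElem?_set_self h]

theorem getE_set_ne (xs : List Int) (i j v : Int) (h0 : 0 ≤ i) (h1 : 0 ≤ j) (hne : i ≠ j) :
    getE (xs.set i.toNat v) j = getE xs j := by
  have : i.toNat ≠ j.toNat := by omega
  simp [getE_natCast _ _ h1, List.getD, List.getElem?_set_ne this]

theorem getE_replicate (m : Nat) (v : Int) (i : Int) (h0 : 0 ≤ i) (h : i.toNat < m) :
    getE (List.replicate m v) i = v := by
  rw [getE_natCast _ _ h0]
  simp [List.getD, h]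

-- dfsA at positive fuel, blocked/out-of-range branch
theorem dfsA_blocked (coins : List Int) (maxJump n : Int) (f : Nat) (index : Int)
    (h : n ≤ index ∨ getE coins index = -1) :
    dfsA coins maxJump n (f + 1) index = (INFA, []) := by
  conv_lhs => rw [dfsA]
  rw [if_pos h]

-- dfsA at positive fuel, main branch, as the literal inner fold
theorem dfsA_succ (coins : List Int) (maxJump n : Int) (f : Nat) (index : Int)
    (h1 : ¬(n ≤ index ∨ getE coins index = -1)) (h2 : ¬ index = n - 1) :
    dfsA coins maxJump n (f + 1) index =
      (PySem.List.pyRange (index + 1) (min (index + maxJump + 1) n) 1).foldl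
        (fun cur next =>
          let nx := dfsA coins maxJump n f next
          let candCost := nx.1 + getE coins index
          let candPath := index :: nx.2
          if candCost < cur.1 then (candCost, candPath)
          else if candCost = cur.1 ∧ lexLt candPath cur.2 then (cur.1, candPath)
          else cur)
        (INFA, []) := by
  conv_lhs => rw [dfsA]
  rw [if_neg h1, if_neg h2]

-- walks from above k do not see the tables at or below k
theorem walkB_congr_above (dp0 nxt0 dp nxt : List Int) (n k : Int)
    (hag : ∀ v : Int, k < v → getE dp v = getE dp0 v ∧ getE nxt v = getE nxt0 v)
    (hptr : ∀ v : Int, k < v → v < n → getE dp0 v < INFA → v ≠ n - 1 → k < getE nxt0 v) :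
    ∀ (f : Nat) (i : Int), k < i → walkB dp nxt n f i = walkB dp0 nxt0 n f i := by
  intro f
  induction f with
  | zero => intro i _; rfl
  | succ g ih =>
    intro i hki
    obtain ⟨hd, hn⟩ := hag i hki
    simp only [walkB, hd, hn]
    by_cases hg : i < n ∧ getE dp0 i < INFA
    · rw [if_pos hg, if_pos hg]
      by_cases hlast : i = n - 1
      · simp [hlast]
      · rw [if_neg hlast, if_neg hlast, ih (getE nxt0 i) (hptr i hki hg.1 hg.2 hlast)]
    · rw [if_neg hg, if_neg hg]

theorem INFA_eq : INFA = 1000000000000000000 := rfl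

theorem coin_bound (coins : List Int) (maxJump : Int) (hDom : Dom_cheapestJump2 coins maxJump)
    (k : Int) (h0 : 0 ≤ k) (hk : k < (coins.length : Int)) :
    -2147483648 ≤ getE coins k ∧ getE coins k ≤ 2147483648 := by
  have hk' : k.toNat < coins.length := by omega
  unfold Dom_cheapestJump2 at hDom
  simp only [Bool.and_eq_true, List.all_eq_true] at hDom
  have := hDom.1 coins[k.toNat] (List.getElem_mem hk')
  simp only [pvDomInt, decide_eq_true_eq] at this
  rw [getE_natCast coins k h0]
  simp [List.getD, List.getElem?_eq_getElem hk']
  omega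

-- the inner-window fold correspondence
theorem innerFold (coins : List Int) (maxJump n k : Int) (f : Nat) (dp0 nxt0 : List Int)
    (hk0 : 0 ≤ k) (hkn : k < n)
    (hlen : dp0.length = coins.length) (hlen2 : nxt0.length = coins.length)
    (hnlen : n = (coins.length : Int))
    (hfin : ∀ j : Int, k < j → j < n → FinI coins maxJump n dp0 nxt0 j)
    (hfk : (n - k).toNat ≤ f + 1) :
    ∀ (js : List Int), js.Pairwise (· < ·) → (∀ j ∈ js, k < j ∧ j < n) →
    ∀ (dp nxt : List Int) (c : Int) (p : List Int),
      MidI coins maxJump n k f dp0 nxt0 dp nxt c p →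
      (c < INFA → ∀ j ∈ js, getE nxt k < j) →
      MidI coins maxJump n k f dp0 nxt0
        (js.foldl (innerB coins k) (dp, nxt)).1 (js.foldl (innerB coins k) (dp, nxt)).2
        (js.foldl
          (fun cur next =>
            let nx := dfsA coins maxJump n f next
            let candCost := nx.1 + getE coins k
            let candPath := k :: nx.2
            if candCost < cur.1 then (candCost, candPath)
            else if candCost = cur.1 ∧ lexLt candPath cur.2 then (cur.1, candPath)
            else cur)
          (c, p)).1
        (js.foldl
          (fun cur next =>
            let nx := dfsA coins maxJump n f next
            let candCost := nx.1 + getE coins k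
            let candPath := k :: nx.2
            if candCost < cur.1 then (candCost, candPath)
            else if candCost = cur.1 ∧ lexLt candPath cur.2 then (cur.1, candPath)
            else cur)
          (c, p)).2 := by
  intro js
  induction js with
  | nil => intro _ _ dp nxt c p hmid _; simpa using hmid
  | cons j rest ih =>
    intro hpair hmem dp nxt c p hmid hbnd
    obtain ⟨hkj, hjn⟩ := hmem j (by simp)
    obtain ⟨hfinj1, hfinj2, hfinj3⟩ := hfin j hkj hjn
    have hjf : (n - j).toNat ≤ f := by omega
    obtain ⟨hdfsj1, -, hdfsj3, hdfsj4⟩ := hfinj3 f hjf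
    obtain ⟨hL1, hL2, hck, hcle, hag, hinf, hfin'⟩ := hmid
    have hkN : k.toNat < dp.length := by rw [hL1, hlen]; omega
    have hkN2 : k.toNat < nxt.length := by rw [hL2, hlen2]; omega
    have hdpj : getE dp j = getE dp0 j := (hag j (by omega) (by omega)).1
    rw [List.foldl_cons, List.foldl_cons]
    simp only [innerB, hdpj, ← hck, hdfsj1]
    by_cases hlt : getE dp0 j + getE coins k < c
    · rw [if_pos hlt, if_pos hlt]
      have hcand_lt : getE dp0 j + getE coins k < INFA := by omega
      refine ih hpair.tail (fun x hx => hmem x (by simp [hx]))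
        _ _ _ _ ⟨by simp [hL1], by simp [hL2], ?_, by omega, ?_, ?_, ?_⟩ ?_
      · rw [getE_set_self _ _ _ hk0 hkN]
      · intro v hv0 hvk
        rw [getE_set_ne _ _ _ _ hk0 hv0 (fun h => hvk h.symm),
            getE_set_ne _ _ _ _ hk0 hv0 (fun h => hvk h.symm)]
        exact hag v hv0 hvk
      · intro h; omega
      · intro _
        rw [getE_set_self _ _ _ hk0 hkN2, getE_set_self _ _ _ hk0 hkN]
        exact ⟨hkj, hjn, rfl, rfl⟩
      · intro _ x hx
        rw [getE_set_self _ _ _ hk0 hkN2]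
        exact (List.pairwise_cons.mp hpair).1 x hx
    · rw [if_neg hlt, if_neg hlt]
      have hkeep : ¬ (getE dp0 j + getE coins k = c ∧
          lexLt (k :: (dfsA coins maxJump n f j).2) p = true) := by
        rintro ⟨heq, hlex⟩
        rcases lt_or_eq_of_le hcle with hcI | hcI
        · -- c < INFA: p = k :: path(x) with x = getE nxt k < j
          obtain ⟨hkx, hxn, hdec, hp⟩ := hfin' hcI
          set x := getE nxt k with hxdef
          have hxj : x < j := hbnd hcI j (by simp)
          rw [hp, lexLt_cons_self] at hlex
          have heq' : getE dp0 j = getE dp0 x := by omega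
          obtain ⟨hfinx1, -, hfinx3⟩ := hfin x hkx hxn
          have hxf : (n - x).toNat ≤ f := by omega
          obtain ⟨-, -, hdfsx3, hdfsx4⟩ := hfinx3 f hxf
          rcases lt_or_eq_of_le hfinj1 with hjI | hjI
          · -- both paths nonempty, heads j > x
            have hxI : getE dp0 x < INFA := by omega
            have hpj := hdfsj4 hjI
            have hpx := hdfsx4 hxI
            have hpj' : ∃ tl, (dfsA coins maxJump n f j).2 = j :: tl := by
              rw [hpj]; split_ifs
              · exact ⟨[], rfl⟩
              · exact ⟨_, rfl⟩
            have hpx' : ∃ tl, (dfsA coins maxJump n f x).2 = x :: tl := by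
              rw [hpx]; split_ifs
              · exact ⟨[], rfl⟩
              · exact ⟨_, rfl⟩
            obtain ⟨tj, htj⟩ := hpj'
            obtain ⟨tx, htx⟩ := hpx'
            rw [htj, htx, lexLt_cons_gt hxj] at hlex
            exact Bool.false_ne_true hlex
          · -- both INF: both paths empty
            have hxI : getE dp0 x = INFA := by omega
            rw [hdfsj3 hjI, hdfsx3 hxI] at hlex
            simp [lexLt] at hlex
        · -- c = INFA: p = []
          rw [(hinf hcI).1, lexLt_nil] at hlex
          exact Bool.false_ne_true hlex
      rw [if_neg hkeep]
      refine ih hpair.tail (fun x hx => hmem x (by simp [hx]))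
        _ _ _ _ ⟨hL1, hL2, hck, hcle, hag, hinf, hfin'⟩ ?_
      intro hcI x hx
      exact hbnd hcI x (by simp [hx])

-- one backward step preserves the invariant
theorem stepB_inv (coins : List Int) (maxJump : Int) (k : Int)
    (st : List Int × List Int)
    (hk0 : 0 ≤ k) (hkn : k < (coins.length : Int) - 1)
    (hInv : InvB coins maxJump coins.length (k + 1) st) :
    InvB coins maxJump coins.length k (stepB coins maxJump coins.length st k) := by
  obtain ⟨dp0, nxt0⟩ := st
  obtain ⟨hlen1, hlen2, hfin, hlow⟩ := hInv
  simp only at hlen1 hlen2 hfin hlow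
  set n : Int := (coins.length : Int) with hn
  have hbase : getE dp0 k = INFA := hlow k hk0 (by omega)
  have hptr : ∀ v : Int, k < v → v < n → getE dp0 v < INFA → v ≠ n - 1 → k < getE nxt0 v := by
    intro v hkv hvn hvI hvl
    have := ((hfin v (by omega) hvn).2.1 hvI hvl).1
    omega
  simp only [stepB]
  by_cases hck : getE coins k = -1
  · rw [if_pos hck]
    refine ⟨hlen1, hlen2, ?_, fun i h0 hik => hlow i h0 (by omega)⟩
    intro i hki hin
    show FinI coins maxJump n dp0 nxt0 i
    rcases eq_or_lt_of_le hki with rfl | hlt'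
    · refine ⟨le_of_eq hbase, by omega, ?_⟩
      intro f hf
      obtain ⟨g, rfl⟩ : ∃ g, f = g + 1 := ⟨f - 1, by omega⟩
      rw [dfsA_blocked coins maxJump n g k (Or.inr hck), hbase]
      refine ⟨rfl, ?_, fun _ => rfl, fun h => absurd h (by omega)⟩
      simp [walkB, hbase]
    · exact hfin i (by omega) hin
  · rw [if_neg hck]
    have hmain : ∀ f : Nat, (n - k).toNat ≤ f + 1 →
        MidI coins maxJump n k f dp0 nxt0
          ((PySem.List.pyRange (k + 1) (min (k + maxJump + 1) n) 1).foldl (innerB coins k) (dp0, nxt0)).1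
          ((PySem.List.pyRange (k + 1) (min (k + maxJump + 1) n) 1).foldl (innerB coins k) (dp0, nxt0)).2
          ((PySem.List.pyRange (k + 1) (min (k + maxJump + 1) n) 1).foldl
            (fun cur next =>
              let nx := dfsA coins maxJump n f next
              let candCost := nx.1 + getE coins k
              let candPath := k :: nx.2
              if candCost < cur.1 then (candCost, candPath)
              else if candCost = cur.1 ∧ lexLt candPath cur.2 then (cur.1, candPath)
              else cur)
            (INFA, [])).1
          ((PySem.List.pyRange (k + 1) (min (k + maxJump + 1) n) 1).foldl
            (fun cur next =>
              let nx := dfsA coins maxJump n f next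
              let candCost := nx.1 + getE coins k
              let candPath := k :: nx.2
              if candCost < cur.1 then (candCost, candPath)
              else if candCost = cur.1 ∧ lexLt candPath cur.2 then (cur.1, candPath)
              else cur)
            (INFA, [])).2 := by
      intro f hf
      refine innerFold coins maxJump n k f dp0 nxt0 hk0 (by omega) hlen1 hlen2 rfl
        (fun j h1 h2 => hfin j (by omega) h2) hf
        _ (PySem.List.pairwise_lt_pyRange_one _ _) ?_
        dp0 nxt0 INFA [] ⟨rfl, rfl, hbase.symm, le_refl _, fun _ _ _ => ⟨rfl, rfl⟩,
          fun _ => ⟨rfl, rfl, rfl⟩, fun h => absurd h (by omega)⟩ (fun h => absurd h (by omega))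
      intro j hj
      rw [PySem.List.mem_pyRange_one] at hj
      omega
    -- the B tables do not depend on f; name them
    set dpN := ((PySem.List.pyRange (k + 1) (min (k + maxJump + 1) n) 1).foldl (innerB coins k) (dp0, nxt0)).1 with hdpN
    set nxN := ((PySem.List.pyRange (k + 1) (min (k + maxJump + 1) n) 1).foldl (innerB coins k) (dp0, nxt0)).2 with hnxN
    have hlenN : dpN.length = coins.length ∧ nxN.length = coins.length := by
      obtain ⟨h1, h2, -⟩ := hmain ((n - k).toNat - 1) (by omega)
      exact ⟨h1.trans hlen1, h2.trans hlen2⟩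
    have hagN : ∀ v : Int, 0 ≤ v → ¬ v = k →
        getE dpN v = getE dp0 v ∧ getE nxN v = getE nxt0 v := by
      obtain ⟨-, -, -, -, h, -⟩ := hmain ((n - k).toNat - 1) (by omega)
      exact h
    have hwalkN : ∀ (g : Nat) (i : Int), k < i →
        walkB dpN nxN n g i = walkB dp0 nxt0 n g i := by
      intro g i hi
      exact walkB_congr_above dp0 nxt0 dpN nxN n k
        (fun v hv => hagN v (by omega) (by omega)) hptr g i hi
    refine ⟨hlenN.1, hlenN.2, ?_, ?_⟩
    · intro i hki hin
      show FinI coins maxJump n dpN nxN i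
      rcases eq_or_lt_of_le hki with rfl | hlt'
      · -- the freshly finalized index i = k
        have hdple : getE dpN k ≤ INFA := by
          obtain ⟨-, -, hck', hcle, -⟩ := hmain ((n - k).toNat - 1) (by omega)
          omega
        have hptrN : getE dpN k < INFA → k ≠ n - 1 → k < getE nxN k ∧ getE nxN k < n := by
          intro hI _
          obtain ⟨-, -, hck', -, -, -, hfin'⟩ := hmain ((n - k).toNat - 1) (by omega)
          obtain ⟨h1, h2, -⟩ := hfin' (by omega)
          exact ⟨h1, h2⟩
        refine ⟨hdple, hptrN, ?_⟩
        intro f hfb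
        obtain ⟨g, rfl⟩ : ∃ g, f = g + 1 := ⟨f - 1, by omega⟩
        obtain ⟨-, -, hck', hcle, -, hinf, hfin'⟩ := hmain g (by omega)
        rw [dfsA_succ coins maxJump n g k (fun hor => hor.elim (fun h => by omega) hck) (by omega)]
        refine ⟨?_, ?_, ?_, ?_⟩
        · exact hck'
        · -- walk = path.map(+1)
          rcases lt_or_eq_of_le hcle with hI | hI
          · obtain ⟨hkx, hxn, -, hp⟩ := hfin' hI
            rw [hp]
            simp only [walkB]
            rw [if_pos ⟨by omega, by omega⟩, if_neg (by omega : ¬ k = n - 1),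
                hwalkN g (getE nxN k) hkx]
            obtain ⟨-, -, hfx3⟩ := hfin (getE nxN k) (by omega) hxn
            obtain ⟨-, hw, -, -⟩ := hfx3 g (by omega)
            rw [hw]
            simp
          · obtain ⟨hp, hdpeq, hnxeq⟩ := hinf hI
            rw [hp]
            have hng : ¬(k < n ∧ getE dpN k < INFA) := by
              rw [hdpeq, hbase]; simp
            simp only [walkB]
            rw [if_neg hng]
            simp
        · intro hI
          exact (hinf (by omega)).1
        · intro hI
          rw [if_neg (by omega : ¬ k = n - 1)]
          obtain ⟨-, -, -, hp⟩ := hfin' (by omega)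
          simpa using hp
      · -- indices above k keep their FinI
        obtain ⟨h1, h2, h3⟩ := hfin i (by omega) hin
        obtain ⟨hd, hx⟩ := hagN i (by omega) (by omega)
        refine ⟨by rw [hd]; exact h1, by rw [hd, hx]; exact h2, ?_⟩
        intro f hf
        obtain ⟨g1, g2, g3, g4⟩ := h3 f hf
        rw [hd, hx, hwalkN f i hlt']
        exact ⟨g1, g2, g3, g4⟩
    · intro i h0 hik
      show getE dpN i = INFA
      rw [(hagN i h0 (by omega)).1]
      exact hlow i h0 (by omega)

-- running the loop from index k down to 0 reaches Inv 0
theorem loopB_inv (coins : List Int) (maxJump : Int) :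
    ∀ (m : Nat) (k : Int) (st : List Int × List Int),
      k + 1 = (m : Int) → k < (coins.length : Int) - 1 →
      InvB coins maxJump coins.length (k + 1) st →
      InvB coins maxJump coins.length 0
        ((PySem.List.pyRange k (-1) (-1)).foldl (stepB coins maxJump coins.length) st) := by
  intro m
  induction m with
  | zero =>
    intro k st hm hkn hInv
    have hk : k = -1 := by omega
    subst hk
    rw [PySem.List.pyRange_neg_one_eq_nil (by omega)]
    simpa using hInv
  | succ m ih =>
    intro k st hm hkn hInv
    have hk : 0 ≤ k := by omega
    rw [PySem.List.pyRange_neg_one_cons (by omega : (-1:Int) < k)]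
    rw [List.foldl_cons]
    exact ih (k - 1) _ (by omega) (by omega)
      (by simpa using stepB_inv coins maxJump k st hk hkn hInv)

-- ===== VERDICT (by name: the statement is the Claim_ definition above) =====
theorem cheapestJump2_spec : Claim_equal_cheapestJump2 := by
  intro coins maxJump hDom
  unfold Spec_cheapestJump2 cheapestJump2 cheapestJump2_alt
  by_cases h0 : coins.length = 0
  · obtain rfl : coins = [] := List.length_eq_zero_iff.mp h0
    simp only [List.length_nil, Nat.cast_zero]
    rw [dfsA_blocked [] maxJump 0 0 0 (Or.inl (by omega))]
    simp [walkB]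
  · simp only
    set n : Int := (coins.length : Int) with hn
    set dp1 : List Int :=
      if coins.length ≠ 0 ∧ getE coins (n - 1) ≠ -1
        then (List.replicate coins.length INFA).set (n - 1).toNat (getE coins (n - 1))
        else List.replicate coins.length INFA with hdp1
    have hbound := coin_bound coins maxJump hDom (n - 1) (by omega) (by omega)
    have hinit : InvB coins maxJump coins.length (n - 1) (dp1, List.replicate coins.length 0) := by
      refine ⟨?_, by simp, ?_, ?_⟩
      · rw [hdp1]; split <;> simp
      · intro i hi hin
        show FinI coins maxJump n dp1 (List.replicate coins.length 0) i
        obtain rfl : i = n - 1 := by omega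
        by_cases hcl : getE coins (n - 1) = -1
        · have hdpi : getE dp1 (n - 1) = INFA := by
            rw [hdp1, if_neg (by simp [hcl])]
            exact getE_replicate _ _ _ (by omega) (by omega)
          refine ⟨le_of_eq hdpi, by omega, ?_⟩
          intro f hf
          obtain ⟨g, rfl⟩ : ∃ g, f = g + 1 := ⟨f - 1, by omega⟩
          rw [dfsA_blocked coins maxJump n g (n - 1) (Or.inr hcl), hdpi]
          refine ⟨rfl, ?_, fun _ => rfl, fun h => absurd h (by omega)⟩
          simp [walkB, hdpi]
        · have hdpi : getE dp1 (n - 1) = getE coins (n - 1) := by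
            rw [hdp1, if_pos ⟨h0, hcl⟩]
            exact getE_set_self _ _ _ (by omega) (by simp; omega)
          refine ⟨by rw [hdpi]; rw [INFA_eq]; omega, by omega, ?_⟩
          intro f hf
          obtain ⟨g, rfl⟩ : ∃ g, f = g + 1 := ⟨f - 1, by omega⟩
          have hstep : dfsA coins maxJump n (g + 1) (n - 1) = (getE coins (n - 1), [n - 1]) := by
            conv_lhs => rw [dfsA]
            rw [if_neg (fun hor => hor.elim (fun h => by omega) hcl), if_pos (by omega)]
          rw [hstep, hdpi]
          refine ⟨rfl, ?_, fun h => absurd h (by rw [INFA_eq]; omega), fun _ => by simp⟩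
          have hguard : getE dp1 (n - 1) < INFA := by
            rw [hdpi, INFA_eq]; omega
          simp only [walkB]
          rw [if_pos ⟨by omega, hguard⟩]
          simp
      · intro i hi hik
        rw [hdp1]
        split
        · rw [getE_set_ne _ _ _ _ (by omega) hi (by omega)]
          exact getE_replicate _ _ _ hi (by omega)
        · exact getE_replicate _ _ _ hi (by omega)
    have hfinal := loopB_inv coins maxJump (n - 1).toNat (n - 2)
      (dp1, List.replicate coins.length 0) (by omega) (by omega) (by rw [(by ring : n - 2 + 1 = n - 1)]; exact hinit)
    obtain ⟨-, -, hfin, -⟩ := hfinal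
    obtain ⟨-, -, h3⟩ := hfin 0 (le_refl 0) (by omega)
    obtain ⟨-, hw, -, -⟩ := h3 (coins.length + 1) (by omega)
    rw [hw]
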